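-- pv_equiv track=rewrite | github.com/cnmasami/leetcode | code/can_place_flower.py | ootherMethod
-- ===== SOURCE A (Python) =====
-- from typing import List
--
-- def ootherMethod(flowerbed: List[int], n: int) -> bool:
--     count = 0
--     flowerbed = [0] + flowerbed + [0]
--     for i in range(1, len(flowerbed) -1):
--         if flowerbed[i] == 0 and flowerbed[i -1] == 0 and flowerbed[i+1] == 0:
--             flowerbed[i] = 1
--             count += 1
--
--         if count >= n:
--             return True
--
--     return False
-- ===== SOURCE B (Python) =====
-- from typing import List
--
-- def ootherMethod(flowerbed: List[int], n: int) -> bool: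
--     total = 0
--     run = 1  # virtual empty plot before the bed
--     for x in flowerbed:
--         if x == 0:
--             run += 1
--         else:
--             total += max(run - 1, 0) // 2
--             run = 0
--     total += run // 2  # virtual empty plot after the bed
--     return total >= n
-- ===== Notes on version B (the rewrite author's own statement) =====
-- stated objective: alternative
-- what changed: Replaced the cell-by-cell greedy simulation with in-place mutation and early return by a single run-length pass that adds a closed-form (run-1)//2 capacity per maximal zero-run (with virtual empty plots at both ends) and compares the total with n.
-- intended difference: On an empty flowerbed with n <= 0, A returns False because its loop body (and hence the count >= n test) never runs, while B returns True, the intended value since zero flowers always fit. — e.g. on ootherMethod([], 0): A returns false, B returns true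
import Mathlib
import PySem

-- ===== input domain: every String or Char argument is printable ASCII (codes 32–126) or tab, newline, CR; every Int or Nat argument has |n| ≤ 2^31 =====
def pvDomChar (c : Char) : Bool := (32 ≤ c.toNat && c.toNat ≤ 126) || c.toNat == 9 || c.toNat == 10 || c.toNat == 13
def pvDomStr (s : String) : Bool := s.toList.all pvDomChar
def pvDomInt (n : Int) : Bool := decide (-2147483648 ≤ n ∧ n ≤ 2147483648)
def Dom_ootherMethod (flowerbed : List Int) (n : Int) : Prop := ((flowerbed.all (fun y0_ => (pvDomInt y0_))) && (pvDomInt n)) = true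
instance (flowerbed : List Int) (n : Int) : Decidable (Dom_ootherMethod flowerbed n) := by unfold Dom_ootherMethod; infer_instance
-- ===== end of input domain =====

-- B replaces A's cell-by-cell greedy placement (list mutation + early return) by a single
-- run-length pass summing the closed-form capacity (run-1)//2 of each maximal zero-run;
-- A's local list mutation is a rebinding, invisible to the caller, so only values matter.

-- ===== PORT A =====
-- one iteration of A's for-loop over index i (st = none once the loop has returned True)
def stepA (n : Int) (st : Option (List Int × Int)) (i : Int) : Option (List Int × Int) :=
  match st with
  | none => none
  | some (bed, count) =>
    let p :=
      if PySem.List.pyGetD bed i 0 = 0 ∧ PySem.List.pyGetD bed (i - 1) 0 = 0 ∧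
          PySem.List.pyGetD bed (i + 1) 0 = 0 then
        (PySem.List.pySetD bed i 1, count + 1)
      else (bed, count)
    if n ≤ p.2 then none else some p

def ootherMethod (flowerbed : List Int) (n : Int) : Bool :=
  let bed : List Int := [0] ++ flowerbed ++ [0]
  ((PySem.List.pyRange 1 ((bed.length : Int) - 1) 1).foldl (stepA n) (some (bed, 0))).isNone

-- ===== PORT B =====
def ootherMethod_alt (flowerbed : List Int) (n : Int) : Bool :=
  let p := flowerbed.foldl
    (fun (p : Int × Int) x =>
      if x = 0 then (p.1, p.2 + 1)
      else (p.1 + PySem.Int.floordiv (max (p.2 - 1) 0) 2, 0))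
    (0, 1)
  decide (n ≤ p.1 + PySem.Int.floordiv p.2 2)

-- ===== PRECONDITION & SPEC =====
-- On an empty flowerbed with n ≤ 0, A returns false because its loop body (and hence the
-- count >= n test) never runs, while B returns true, the intended value: zero flowers always fit.
def D_ootherMethod (flowerbed : List Int) (n : Int) : Prop := flowerbed = [] ∧ n ≤ 0
instance (flowerbed : List Int) (n : Int) : Decidable (D_ootherMethod flowerbed n) := by unfold D_ootherMethod; infer_instance

def Spec_ootherMethod (flowerbed : List Int) (n : Int) (out : Bool) : Prop := ¬ D_ootherMethod flowerbed n → out = ootherMethod_alt flowerbed n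
instance (flowerbed : List Int) (n : Int) (out : Bool) : Decidable (Spec_ootherMethod flowerbed n out) := by unfold Spec_ootherMethod; infer_instance

def pvDiffWitness_ootherMethod : List Int × Int := ([], 0)
def pvDiffWitnessOut_ootherMethod : Bool × Bool := (false, true)

-- ===== CLAIM (what is proved, stated in full; the proofs are below) =====
def Claim_unchanged_ootherMethod : Prop := ∀ (flowerbed : List Int) (n : Int), Dom_ootherMethod flowerbed n → Spec_ootherMethod flowerbed n (ootherMethod flowerbed n)
def Claim_changed_ootherMethod : Prop := Dom_ootherMethod (pvDiffWitness_ootherMethod.1) (pvDiffWitness_ootherMethod.2) ∧ D_ootherMethod (pvDiffWitness_ootherMethod.1) (pvDiffWitness_ootherMethod.2) ∧ ootherMethod (pvDiffWitness_ootherMethod.1) (pvDiffWitness_ootherMethod.2) = pvDiffWitnessOut_ootherMethod.1 ∧ ootherMethod_alt (pvDiffWitness_ootherMethod.1) (pvDiffWitness_ootherMethod.2) = pvDiffWitnessOut_ootherMethod.2 ∧ pvDiffWitnessOut_ootherMethod.1 ≠ pvDiffWitnessOut_ootherMethod.2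
def Claim_exact_ootherMethod : Prop := ∀ (flowerbed : List Int) (n : Int), Dom_ootherMethod flowerbed n → D_ootherMethod flowerbed n → ootherMethod flowerbed n ≠ ootherMethod_alt flowerbed n

-- ===== LEMMAS AND PROOFS =====

-- A's loop as a structural recursion: prev = current value of cell i-1 (after mutation),
-- the list argument = the cells still to visit (the final pad is handled by headD 0).
def loopA (n : Int) : Int → Int → List Int → Bool
  | _, _, [] => false
  | prev, count, x :: rest =>
    let c := x = 0 ∧ prev = 0 ∧ rest.headD 0 = 0
    let prev' := if c then 1 else x
    let count' := if c then count + 1 else count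
    if n ≤ count' then true else loopA n prev' count' rest

-- total number of flowers A's greedy places, same recursion without n
def gcount : Int → List Int → Int
  | _, [] => 0
  | prev, x :: rest =>
    if x = 0 ∧ prev = 0 ∧ rest.headD 0 = 0 then 1 + gcount 1 rest else gcount x rest

-- B's remaining sum, given the current zero-run length r
def bsum : Int → List Int → Int
  | r, [] => PySem.Int.floordiv r 2
  | r, x :: rest =>
    if x = 0 then bsum (r + 1) rest
    else PySem.Int.floordiv (max (r - 1) 0) 2 + bsum 0 rest

theorem foldl_stepA_none (n : Int) (l : List Int) : l.foldl (stepA n) none = none := by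
  induction l with
  | nil => rfl
  | cons x t ih => simpa [stepA] using ih

theorem getD_append_length (pre z : List Int) (d : Int) :
    (pre ++ z).getD pre.length d = z.getD 0 d := by
  cases z with
  | nil => simp [List.getD]
  | cons y t => simp [List.getD_append_right]

theorem headD_append_zero (rest : List Int) : (rest ++ [(0:Int)]).getD 0 0 = rest.headD 0 := by
  cases rest <;> rfl

theorem set_append_length (pre z : List Int) (x v : Int) :
    (pre ++ x :: z).set pre.length v = pre ++ v :: z := by
  induction pre with
  | nil => rfl
  | cons a t ih => simp [ih]

-- bridge: A's indexed fold over bed = pre ++ prev :: xs ++ [0], from index pre.length+1, is loopA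
theorem bridgeA (n : Int) : ∀ (xs pre : List Int) (v count : Int),
    ((PySem.List.pyRange ((pre.length + 1 : Nat) : Int) ((pre.length + 1 + xs.length : Nat) : Int) 1).foldl
      (stepA n) (some (pre ++ v :: (xs ++ [0]), count))).isNone = loopA n v count xs := by
  intro xs
  induction xs with
  | nil =>
    intro pre v count
    simp [PySem.List.pyRange_one_eq_nil, loopA]
  | cons x rest ih =>
    intro pre v count
    have hlt : ((pre.length + 1 : Nat) : Int) < ((pre.length + 1 + (x :: rest).length : Nat) : Int) := by
      push_cast [List.length_cons]; omega
    rw [PySem.List.pyRange_one_cons hlt]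
    simp only [List.foldl_cons]
    have hbed : pre ++ v :: (x :: rest ++ [0]) = (pre ++ [v]) ++ x :: (rest ++ [0]) := by simp
    -- the three reads and the write, at Int index ↑(pre.length+1)
    have hgx : PySem.List.pyGetD (pre ++ v :: (x :: rest ++ [0])) ((pre.length + 1 : Nat) : Int) 0 = x := by
      rw [hbed, PySem.List.pyGetD_natCast]
      have : (pre ++ [v]).length = pre.length + 1 := by simp
      rw [← this, getD_append_length]; rfl
    have hgp : PySem.List.pyGetD (pre ++ v :: (x :: rest ++ [0])) (((pre.length + 1 : Nat) : Int) - 1) 0 = v := by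
      have h1 : (((pre.length + 1 : Nat) : Int) - 1) = ((pre.length : Nat) : Int) := by push_cast; ring
      rw [h1, PySem.List.pyGetD_natCast, getD_append_length]; rfl
    have hgn : PySem.List.pyGetD (pre ++ v :: (x :: rest ++ [0])) (((pre.length + 1 : Nat) : Int) + 1) 0 = rest.headD 0 := by
      have h1 : (((pre.length + 1 : Nat) : Int) + 1) = ((pre.length + 2 : Nat) : Int) := by push_cast; ring
      have h2 : pre ++ v :: (x :: rest ++ [0]) = (pre ++ [v, x]) ++ (rest ++ [0]) := by simp
      have h3 : (pre ++ [v, x]).length = pre.length + 2 := by simp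
      rw [h1, PySem.List.pyGetD_natCast, h2, ← h3, getD_append_length, headD_append_zero]
    have hset : PySem.List.pySetD (pre ++ v :: (x :: rest ++ [0])) ((pre.length + 1 : Nat) : Int) 1
        = pre ++ v :: (1 :: rest ++ [0]) := by
      rw [PySem.List.pySetD_natCast, hbed]
      have h3 : (pre ++ [v]).length = pre.length + 1 := by simp
      rw [← h3, set_append_length]; simp
    by_cases hc : x = 0 ∧ v = 0 ∧ rest.headD 0 = 0
    · -- place a flower
      have hh' : rest.head?.getD 0 = (0:Int) := by
        have h := hc.2.2; cases rest <;> simpa using h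
      rw [show stepA n (some (pre ++ v :: (x :: rest ++ [0]), count)) ((pre.length + 1 : Nat) : Int)
          = (if n ≤ count + 1 then none else some (pre ++ v :: (1 :: rest ++ [0]), count + 1)) by
        simp only [stepA, hgx, hgp, hgn, hset]; rw [if_pos hc]]
      by_cases hn : n ≤ count + 1
      · rw [if_pos hn, foldl_stepA_none]
        simp [loopA, hc.1, hc.2.1, hc.2.2, hh', hn]
      · rw [if_neg hn]
        have hre : pre ++ v :: (1 :: rest ++ [0]) = (pre ++ [v]) ++ (1:Int) :: (rest ++ [0]) := by simp
        have hlen : ((pre ++ [v]).length + 1 : Nat) = pre.length + 1 + 1 := by simp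
        have := ih (pre ++ [v]) 1 (count + 1)
        rw [hlen] at this
        rw [hre]
        have harg : (pre.length + 1 + (x :: rest).length : Nat) = (pre.length + 1 + 1 + rest.length : Nat) := by
          simp [List.length_cons]; omega
        have hcast : ((pre.length + 1 : Nat) : Int) + 1 = ((pre.length + 1 + 1 : Nat) : Int) := by
          push_cast; ring
        rw [harg, hcast, this]
        simp [loopA, hc.1, hc.2.1, hc.2.2, hh', hn]
    · -- no placement
      have hcg : ¬ (x = 0 ∧ v = 0 ∧ rest.head?.getD 0 = 0) := by
        intro h; exact hc ⟨h.1, h.2.1, by cases rest <;> simpa using h.2.2⟩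
      rw [show stepA n (some (pre ++ v :: (x :: rest ++ [0]), count)) ((pre.length + 1 : Nat) : Int)
          = (if n ≤ count then none else some (pre ++ v :: (x :: rest ++ [0]), count)) by
        simp only [stepA, hgx, hgp, hgn]; rw [if_neg hc]]
      by_cases hn : n ≤ count
      · rw [if_pos hn, foldl_stepA_none]
        simp [loopA, hc, hcg, hn]
      · rw [if_neg hn]
        have hre : pre ++ v :: (x :: rest ++ [0]) = (pre ++ [v]) ++ x :: (rest ++ [0]) := by simp
        have hlen : ((pre ++ [v]).length + 1 : Nat) = pre.length + 1 + 1 := by simp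
        have := ih (pre ++ [v]) x count
        rw [hlen] at this
        rw [hre]
        have harg : (pre.length + 1 + (x :: rest).length : Nat) = (pre.length + 1 + 1 + rest.length : Nat) := by
          simp [List.length_cons]; omega
        have hcast : ((pre.length + 1 : Nat) : Int) + 1 = ((pre.length + 1 + 1 : Nat) : Int) := by
          push_cast; ring
        rw [harg, hcast, this]
        simp [loopA, hc, hcg, hn]

theorem A_eq_loopA (flowerbed : List Int) (n : Int) :
    ootherMethod flowerbed n = loopA n 0 0 flowerbed := by
  have h := bridgeA n flowerbed [] 0 0
  simp only [List.length_nil, List.nil_append] at h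
  have e1 : ((0 + 1 : Nat) : Int) = 1 := by norm_num
  have e2 : ((0 + 1 + flowerbed.length : Nat) : Int) = ((([0] ++ flowerbed ++ [0] : List Int)).length : Int) - 1 := by
    simp only [List.length_append, List.length_cons, List.length_nil]; push_cast; ring
  rw [e1, e2] at h
  show ((PySem.List.pyRange 1 ((([0] ++ flowerbed ++ [0] : List Int).length : Int) - 1) 1).foldl (stepA n) (some ([0] ++ flowerbed ++ [0], 0))).isNone = _
  simpa using h

theorem gcount_nonneg : ∀ (prev : Int) (xs : List Int), 0 ≤ gcount prev xs := by
  intro prev xs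
  induction xs generalizing prev with
  | nil => simp [gcount]
  | cons x rest ih =>
    by_cases hc : x = 0 ∧ prev = 0 ∧ rest.headD 0 = 0
    · simp only [gcount, if_pos hc]; have := ih 1; omega
    · simp only [gcount, if_neg hc]; exact ih x

theorem loopA_eq_gcount (n : Int) : ∀ (xs : List Int) (prev count : Int), xs ≠ [] →
    loopA n prev count xs = decide (n ≤ count + gcount prev xs) := by
  intro xs
  induction xs with
  | nil => intro _ _ h; exact absurd rfl h
  | cons x rest ih =>
    intro prev count _
    by_cases hc : x = 0 ∧ prev = 0 ∧ rest.headD 0 = 0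
    · simp only [loopA, gcount, if_pos hc]
      cases rest with
      | nil =>
        simp only [gcount]
        by_cases hn : n ≤ count + 1
        · rw [if_pos hn]; simp; omega
        · rw [if_neg hn]; simp [loopA]; omega
      | cons y t =>
        rw [ih 1 (count + 1) (by simp)]
        by_cases hn : n ≤ count + 1
        · rw [if_pos hn]
          have := gcount_nonneg 1 (y :: t)
          simp; omega
        · rw [if_neg hn]; congr 1; push_cast; ring
    · simp only [loopA, gcount, if_neg hc]
      cases rest with
      | nil =>
        simp only [gcount]
        by_cases hn : n ≤ count
        · rw [if_pos hn]; simp; omega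
        · rw [if_neg hn]; simp [loopA]; omega
      | cons y t =>
        rw [ih x count (by simp)]
        by_cases hn : n ≤ count
        · rw [if_pos hn]
          have := gcount_nonneg x (y :: t)
          simp; omega
        · rw [if_neg hn]

-- the placements A's greedy has already made inside the current zero-run of length r
def booked (r : Int) : List Int → Int
  | [] => PySem.Int.floordiv r 2
  | x :: _ => if x = 0 then PySem.Int.floordiv r 2 else PySem.Int.floordiv (max (r - 1) 0) 2

-- reachable (prev, r) states: fresh after a blocker, or inside a run with the parity link
def inv (prev r : Int) : List Int → Prop
  | [] => (r = 0 ∧ prev ≠ 0) ∨ (1 ≤ r ∧ ((r % 2 = 0 ∧ prev = 1) ∨ (r % 2 = 1 ∧ prev = 0)))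
  | x :: _ =>
    if x = 0 then (r = 0 ∧ prev ≠ 0) ∨ (1 ≤ r ∧ ((r % 2 = 0 ∧ prev = 1) ∨ (r % 2 = 1 ∧ prev = 0)))
    else (r = 0 ∧ prev ≠ 0) ∨ (1 ≤ r ∧ prev = 0)

theorem fd2 (a : Int) : PySem.Int.floordiv a 2 = a / 2 :=
  PySem.Int.floordiv_eq_ediv_of_pos (by omega)

theorem gcount_cons (prev x : Int) (rest : List Int) :
    gcount prev (x :: rest)
      = if x = 0 ∧ prev = 0 ∧ rest.headD 0 = 0 then 1 + gcount 1 rest else gcount x rest := rfl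

theorem bsum_cons (r x : Int) (rest : List Int) :
    bsum r (x :: rest)
      = if x = 0 then bsum (r + 1) rest else PySem.Int.floordiv (max (r - 1) 0) 2 + bsum 0 rest := rfl

theorem booked_nil (r : Int) : booked r [] = PySem.Int.floordiv r 2 := rfl

theorem booked_cons (r x : Int) (rest : List Int) :
    booked r (x :: rest)
      = if x = 0 then PySem.Int.floordiv r 2 else PySem.Int.floordiv (max (r - 1) 0) 2 := rfl

theorem gcount_eq_bsum : ∀ (xs : List Int) (prev r : Int), 0 ≤ r → inv prev r xs →
    gcount prev xs = bsum r xs - booked r xs := by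
  intro xs
  induction xs with
  | nil => intro prev r _ _; simp [gcount, bsum, booked]
  | cons x rest ih =>
    intro prev r hr hinv
    by_cases hx : x = 0
    · subst hx
      simp only [inv, if_pos rfl] at hinv
      rw [bsum_cons, if_pos rfl, booked_cons, if_pos rfl]
      rcases hinv with ⟨hr0, hprev⟩ | ⟨hr1, hpar⟩
      · -- fresh after a blocker: no placement possible here
        subst hr0
        have hc : ¬ ((0:Int) = 0 ∧ prev = 0 ∧ rest.headD 0 = 0) := by
          rintro ⟨_, h, _⟩; exact hprev h
        have hi : inv 0 (0 + 1 : Int) rest := by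
          cases rest with
          | nil => simp [inv] <;> omega
          | cons y t => by_cases hy : y = 0 <;> simp [inv, hy] <;> omega
        have hb : booked (0 + 1 : Int) rest = 0 := by
          cases rest with
          | nil => rw [booked_nil, fd2]; omega
          | cons y t =>
            by_cases hy : y = 0
            · rw [booked_cons, if_pos hy, fd2]; omega
            · rw [booked_cons, if_neg hy, fd2]; omega
        rw [gcount_cons, if_neg hc, ih 0 (0 + 1) (by omega) hi, hb, fd2]
        omega
      · rcases hpar with ⟨hev, hp1⟩ | ⟨hod, hp0⟩
        · -- inside a run, r even, prev = 1 (A just placed): no placement here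
          subst hp1
          have hc : ¬ ((0:Int) = 0 ∧ (1:Int) = 0 ∧ rest.headD 0 = 0) := by
            rintro ⟨_, h, _⟩; omega
          have hi : inv 0 (r + 1) rest := by
            cases rest with
            | nil => simp [inv] <;> omega
            | cons y t => by_cases hy : y = 0 <;> simp [inv, hy] <;> omega
          have hb : booked (r + 1) rest = PySem.Int.floordiv r 2 := by
            cases rest with
            | nil => rw [booked_nil, fd2, fd2]; omega
            | cons y t =>
              by_cases hy : y = 0
              · rw [booked_cons, if_pos hy, fd2, fd2]; omega
              · rw [booked_cons, if_neg hy, fd2, fd2]; omega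
          rw [gcount_cons, if_neg hc, ih 0 (r + 1) (by omega) hi, hb]
        · -- inside a run, r odd, prev = 0
          subst hp0
          by_cases hh : rest.headD 0 = 0
          · -- next plot also empty: A places a flower here
            have hc : ((0:Int) = 0 ∧ (0:Int) = 0 ∧ rest.headD 0 = 0) := ⟨rfl, rfl, hh⟩
            have hi : inv 1 (r + 1) rest := by
              cases rest with
              | nil => simp [inv] <;> omega
              | cons y t =>
                have hy : y = 0 := by simpa using hh
                simp [inv, hy] <;> omega
            have hb : booked (r + 1) rest = PySem.Int.floordiv (r + 1) 2 := by
              cases rest with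
              | nil => rw [booked_nil]
              | cons y t =>
                have hy : y = 0 := by simpa using hh
                rw [booked_cons, if_pos hy]
            rw [gcount_cons, if_pos hc, ih 1 (r + 1) (by omega) hi, hb, fd2, fd2]
            omega
          · -- next plot is a blocker: no placement here
            obtain ⟨y, t, hrest⟩ : ∃ y t, rest = y :: t := by
              cases rest with
              | nil => exact absurd rfl hh
              | cons y t => exact ⟨y, t, rfl⟩
            subst hrest
            have hy : y ≠ 0 := by simpa using hh
            have hc : ¬ ((0:Int) = 0 ∧ (0:Int) = 0 ∧ (y :: t).headD 0 = 0) := by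
              rintro ⟨_, _, h⟩; exact hh h
            have hi : inv 0 (r + 1) (y :: t) := by simp [inv, hy] <;> omega
            have hb : booked (r + 1) (y :: t) = PySem.Int.floordiv (max (r + 1 - 1) 0) 2 := by
              rw [booked_cons, if_neg hy]
            rw [gcount_cons, if_neg hc, ih 0 (r + 1) (by omega) hi, hb, fd2, fd2]
            omega
    · -- x is a blocker: the run ends; B books max(r-1,0)//2 = A's placements in that run
      have hc : ¬ (x = 0 ∧ prev = 0 ∧ rest.headD 0 = 0) := by rintro ⟨h, _, _⟩; exact hx h
      have hi : inv x 0 rest := by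
        cases rest with
        | nil => simp [inv]; exact hx
        | cons y t => by_cases hy : y = 0 <;> simp [inv, hy] <;> exact hx
      have hb : booked 0 rest = 0 := by
        cases rest with
        | nil => rw [booked_nil, fd2]; omega
        | cons y t =>
          by_cases hy : y = 0
          · rw [booked_cons, if_pos hy, fd2]; omega
          · rw [booked_cons, if_neg hy, fd2]; omega
      rw [gcount_cons, if_neg hc, bsum_cons, if_neg hx, booked_cons, if_neg hx,
        ih x 0 le_rfl hi, hb]
      omega

theorem B_eq_bsum (flowerbed : List Int) (n : Int) :
    ootherMethod_alt flowerbed n = decide (n ≤ bsum 1 flowerbed) := by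
  unfold ootherMethod_alt
  suffices h : ∀ (xs : List Int) (t r : Int),
      (xs.foldl (fun (p : Int × Int) x =>
        if x = 0 then (p.1, p.2 + 1)
        else (p.1 + PySem.Int.floordiv (max (p.2 - 1) 0) 2, 0)) (t, r)).1
      + PySem.Int.floordiv (xs.foldl (fun (p : Int × Int) x =>
        if x = 0 then (p.1, p.2 + 1)
        else (p.1 + PySem.Int.floordiv (max (p.2 - 1) 0) 2, 0)) (t, r)).2 2
      = t + bsum r xs by
    simp only [h flowerbed 0 1, zero_add]
  intro xs
  induction xs with
  | nil => intro t r; simp [bsum]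
  | cons x rest ih =>
    intro t r
    by_cases hx : x = 0
    · simp only [List.foldl_cons, hx, if_pos, reduceIte, bsum, ih]
    · simp only [List.foldl_cons, hx, if_neg, reduceIte, bsum, ih]; ring

theorem inv_init (xs : List Int) : inv 0 1 xs := by
  cases xs with
  | nil => simp [inv]
  | cons y t => by_cases hy : y = 0 <;> simp [inv, hy]

theorem booked_init (xs : List Int) : booked 1 xs = 0 := by
  cases xs with
  | nil => simp [booked, fd2]
  | cons y t => by_cases hy : y = 0 <;> simp [booked, hy]

-- ===== VERDICT (by name: the statement is the Claim_ definition above) =====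
theorem ootherMethod_spec : Claim_unchanged_ootherMethod := by
  intro flowerbed n _ hD
  rw [B_eq_bsum, A_eq_loopA]
  cases flowerbed with
  | nil =>
    have hn : 0 < n := by
      by_contra h
      exact hD ⟨rfl, by omega⟩
    simp only [loopA, bsum, fd2]
    symm; simp; omega
  | cons x rest =>
    rw [loopA_eq_gcount n (x :: rest) 0 0 (by simp)]
    rw [gcount_eq_bsum (x :: rest) 0 1 (by omega) (inv_init _), booked_init]
    simp

theorem ootherMethod_changed : Claim_changed_ootherMethod := by
  unfold Claim_changed_ootherMethod; decide

theorem ootherMethod_tight : Claim_exact_ootherMethod := by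
  intro flowerbed n _ hD
  obtain ⟨hfb, hn⟩ := hD
  subst hfb
  rw [A_eq_loopA, B_eq_bsum]
  simp only [loopA, bsum, fd2]
  simp; omega
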